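-- pv_equiv track=rewrite | github.com/sreejita09/AI-Study-Pal | services/knowledge_graph.py | _find_matching_topic
-- ===== SOURCE A (Python) =====
-- from typing import Dict, List, Set, Tuple
--
-- def _find_matching_topic(query: str, topics: List[str]) -> str:
--     """Find closest matching topic from list"""
--     query_lower = query.lower()
--
--     # Exact match
--     for topic in topics:
--         if topic.lower() == query_lower:
--             return topic
--
--     # Substring match
--     for topic in topics:
--         if query_lower in topic.lower():
--             return topic
--
--     # Partial word match
--     query_words = query_lower.split()
--     for topic in topics:
--         topic_words = topic.lower().split()
--         if any(q_word in topic_words for q_word in query_words):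
--             return topic
--
--     return None
-- ===== SOURCE B (Python) =====
-- def _find_matching_topic(query, topics):
--     """Find closest matching topic: one pass keeping the first topic of highest match strength."""
--     query_lower = query.lower()
--     query_words = query_lower.split()
--     best_priority = 0
--     best_topic = None
--     for topic in topics:
--         topic_lower = topic.lower()
--         if topic_lower == query_lower:
--             priority = 3
--         elif query_lower in topic_lower:
--             priority = 2
--         elif any(w in topic_lower.split() for w in query_words):
--             priority = 1
--         else:
--             priority = 0
--         if priority > best_priority:
--             best_priority = priority
--             best_topic = topic
--     return best_topic
-- ===== Notes on version B (the rewrite author's own statement) =====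
-- stated objective: alternative
-- what changed: Replaces A's three separate passes over topics (exact, then substring, then word match) with a single pass that scores each topic 3/2/1/0 and keeps the first topic of strictly highest score.
import Mathlib
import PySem

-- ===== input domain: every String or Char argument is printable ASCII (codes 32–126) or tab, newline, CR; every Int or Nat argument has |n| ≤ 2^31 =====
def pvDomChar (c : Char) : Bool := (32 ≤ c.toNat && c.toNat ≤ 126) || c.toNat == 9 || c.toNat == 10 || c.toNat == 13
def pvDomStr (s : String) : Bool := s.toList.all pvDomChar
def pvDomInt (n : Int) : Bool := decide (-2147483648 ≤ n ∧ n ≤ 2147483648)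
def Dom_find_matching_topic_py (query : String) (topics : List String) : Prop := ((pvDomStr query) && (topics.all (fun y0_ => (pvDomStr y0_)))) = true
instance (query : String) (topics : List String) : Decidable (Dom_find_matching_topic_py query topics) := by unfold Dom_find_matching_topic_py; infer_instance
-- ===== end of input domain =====

-- B replaces A's three successive passes over topics (exact, substring, word match) by a single scored pass; objective: alternative decomposition, same result.


-- ===== PORT A =====
-- first loop of A: exact match
def aExactLoop (ql : String) : List String → Option String
  | [] => none
  | t :: rest => if PySem.Str.lower t == ql then some t else aExactLoop ql rest

-- second loop of A: substring match
def aSubLoop (ql : String) : List String → Option String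
  | [] => none
  | t :: rest => if PySem.Str.isIn ql (PySem.Str.lower t) then some t else aSubLoop ql rest

-- third loop of A: partial word match
def aWordLoop (qws : List String) : List String → Option String
  | [] => none
  | t :: rest =>
      if qws.any (fun w => (PySem.Str.split₀ (PySem.Str.lower t)).contains w) then some t
      else aWordLoop qws rest

def find_matching_topic_py (query : String) (topics : List String) : Option String :=
  match aExactLoop (PySem.Str.lower query) topics with
  | some t => some t
  | none =>
    match aSubLoop (PySem.Str.lower query) topics with
    | some t => some t
    | none => aWordLoop (PySem.Str.split₀ (PySem.Str.lower query)) topics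

-- ===== PORT B =====
-- score of one topic: 3 exact, 2 substring, 1 word match, 0 otherwise
def bPriority (ql : String) (qws : List String) (t : String) : Int :=
  if PySem.Str.lower t == ql then 3
  else if PySem.Str.isIn ql (PySem.Str.lower t) then 2
  else if qws.any (fun w => (PySem.Str.split₀ (PySem.Str.lower t)).contains w) then 1
  else 0

-- B's single loop: keep the first topic of strictly highest priority
def bLoop (ql : String) (qws : List String) : List String → Int → Option String → Option String
  | [], _, bt => bt
  | t :: rest, bp, bt =>
      let p := bPriority ql qws t
      if p > bp then bLoop ql qws rest p (some t) else bLoop ql qws rest bp bt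

def find_matching_topic_py_alt (query : String) (topics : List String) : Option String :=
  bLoop (PySem.Str.lower query) (PySem.Str.split₀ (PySem.Str.lower query)) topics 0 none

-- ===== PRECONDITION & SPEC =====
def Spec_find_matching_topic_py (query : String) (topics : List String) (out : Option String) : Prop := out = find_matching_topic_py_alt query topics
instance (query : String) (topics : List String) (out : Option String) : Decidable (Spec_find_matching_topic_py query topics out) := by unfold Spec_find_matching_topic_py; infer_instance

-- ===== CLAIM (what is proved, stated in full; the proofs are below) =====
def Claim_equal_find_matching_topic_py : Prop := ∀ (query : String) (topics : List String), Dom_find_matching_topic_py query topics → Spec_find_matching_topic_py query topics (find_matching_topic_py query topics)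

-- ===== LEMMAS AND PROOFS =====

theorem bPriority_cases (ql : String) (qws : List String) (t : String) :
    bPriority ql qws t = 3 ∨ bPriority ql qws t = 2 ∨ bPriority ql qws t = 1 ∨ bPriority ql qws t = 0 := by
  unfold bPriority; split_ifs <;> simp

theorem bPriority_beq_three (ql : String) (qws : List String) (t : String) :
    (bPriority ql qws t == 3) = (PySem.Str.lower t == ql) := by
  unfold bPriority; split_ifs with h1 h2 h3 <;> simp_all

theorem bPriority_beq_two (ql : String) (qws : List String) (t : String)
    (hne : (PySem.Str.lower t == ql) = false) :
    (bPriority ql qws t == 2) = PySem.Str.isIn ql (PySem.Str.lower t) := by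
  unfold bPriority; split_ifs with h1 h2 h3 <;> simp_all

theorem bPriority_beq_one (ql : String) (qws : List String) (t : String)
    (hne : (PySem.Str.lower t == ql) = false)
    (hns : PySem.Str.isIn ql (PySem.Str.lower t) = false) :
    (bPriority ql qws t == 1) = qws.any (fun w => (PySem.Str.split₀ (PySem.Str.lower t)).contains w) := by
  unfold bPriority; split_ifs with h1 h2 h3 <;> simp_all

theorem aExactLoop_eq_find? (ql : String) (l : List String) :
    aExactLoop ql l = l.find? (fun t => PySem.Str.lower t == ql) := by
  induction l with
  | nil => rfl
  | cons t rest ih =>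
      rw [aExactLoop, List.find?_cons]
      cases h : (PySem.Str.lower t == ql) <;> simp [h, ih]

theorem aSubLoop_eq_find? (ql : String) (l : List String) :
    aSubLoop ql l = l.find? (fun t => PySem.Str.isIn ql (PySem.Str.lower t)) := by
  induction l with
  | nil => rfl
  | cons t rest ih =>
      rw [aSubLoop, List.find?_cons]
      cases h : PySem.Str.isIn ql (PySem.Str.lower t) <;> simp [h, ih]

theorem aWordLoop_eq_find? (qws : List String) (l : List String) :
    aWordLoop qws l = l.find? (fun t => qws.any (fun w => (PySem.Str.split₀ (PySem.Str.lower t)).contains w)) := by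
  induction l with
  | nil => rfl
  | cons t rest ih =>
      rw [aWordLoop, List.find?_cons]
      cases h : qws.any (fun w => (PySem.Str.split₀ (PySem.Str.lower t)).contains w) <;> simp [h, ih]

theorem find?_congr_mem {α : Type} (p q : α → Bool) (l : List α) (h : ∀ x ∈ l, p x = q x) :
    l.find? p = l.find? q := by
  induction l with
  | nil => rfl
  | cons x rest ih =>
      simp only [List.find?_cons]
      rw [h x (by simp)]
      cases q x
      · exact ih (fun y hy => h y (by simp [hy]))
      · rfl

-- characterisation of B's loop: for a non-negative incoming best priority, the final best
-- topic is the first topic of the highest priority level that exceeds it (else the incoming one)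
theorem bLoop_spec (ql : String) (qws : List String) (l : List String) :
    ∀ (bp : Int) (bt : Option String), 0 ≤ bp → bLoop ql qws l bp bt =
      if (l.any fun t => bPriority ql qws t == 3) && decide (bp < 3) then l.find? (fun t => bPriority ql qws t == 3)
      else if (l.any fun t => bPriority ql qws t == 2) && decide (bp < 2) then l.find? (fun t => bPriority ql qws t == 2)
      else if (l.any fun t => bPriority ql qws t == 1) && decide (bp < 1) then l.find? (fun t => bPriority ql qws t == 1)
      else bt := by
  induction l with
  | nil => intro bp bt _; simp [bLoop]
  | cons t rest ih =>
      intro bp bt hbp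
      rcases bPriority_cases ql qws t with h | h | h | h
      · -- exact match: priority 3
        by_cases hb : bp < 3
        · rw [show bLoop ql qws (t :: rest) bp bt = bLoop ql qws rest 3 (some t) by
            simp [bLoop, h, hb]]
          rw [ih 3 (some t) (by omega)]
          simp [List.any_cons, List.find?_cons, h, hb]
        · have h2 : ¬ bp < 2 := by omega
          have h1 : ¬ bp < 1 := by omega
          rw [show bLoop ql qws (t :: rest) bp bt = bLoop ql qws rest bp bt by
            simp [bLoop, h, hb]]
          rw [ih bp bt hbp]
          simp [List.any_cons, List.find?_cons, h, hb, h2, h1]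
      · -- substring match: priority 2
        by_cases hb : bp < 2
        · have h3 : bp < 3 := by omega
          rw [show bLoop ql qws (t :: rest) bp bt = bLoop ql qws rest 2 (some t) by
            simp [bLoop, h, hb]]
          rw [ih 2 (some t) (by omega)]
          cases hr3 : rest.any (fun t => bPriority ql qws t == 3) <;>
            simp [List.any_cons, List.find?_cons, h, hb, h3, hr3]
        · have h1 : ¬ bp < 1 := by omega
          rw [show bLoop ql qws (t :: rest) bp bt = bLoop ql qws rest bp bt by
            simp [bLoop, h, hb]]
          rw [ih bp bt hbp]
          simp [List.any_cons, List.find?_cons, h, hb, h1]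
      · -- word match: priority 1
        by_cases hb : bp < 1
        · have h3 : bp < 3 := by omega
          have h2 : bp < 2 := by omega
          rw [show bLoop ql qws (t :: rest) bp bt = bLoop ql qws rest 1 (some t) by
            simp [bLoop, h, hb]]
          rw [ih 1 (some t) (by omega)]
          cases hr3 : rest.any (fun t => bPriority ql qws t == 3) <;>
            cases hr2 : rest.any (fun t => bPriority ql qws t == 2) <;>
              simp [List.any_cons, List.find?_cons, h, hb, h3, h2, hr3, hr2]
        · rw [show bLoop ql qws (t :: rest) bp bt = bLoop ql qws rest bp bt by
            simp [bLoop, h, hb]]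
          rw [ih bp bt hbp]
          simp [List.any_cons, List.find?_cons, h, hb]
      · -- no match: priority 0
        rw [show bLoop ql qws (t :: rest) bp bt = bLoop ql qws rest bp bt by
          simp [bLoop, h]; omega]
        rw [ih bp bt hbp]
        simp [List.any_cons, List.find?_cons, h]

theorem find_matching_topic_py_eq (query : String) (topics : List String) :
    find_matching_topic_py query topics = find_matching_topic_py_alt query topics := by
  unfold find_matching_topic_py find_matching_topic_py_alt
  rw [bLoop_spec _ _ _ 0 none (by norm_num)]
  rw [aExactLoop_eq_find?, aSubLoop_eq_find?, aWordLoop_eq_find?]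
  set ql := PySem.Str.lower query with hql
  set qws := PySem.Str.split₀ ql with hqws
  have he3 : topics.find? (fun t => PySem.Str.lower t == ql)
      = topics.find? (fun t => bPriority ql qws t == 3) :=
    find?_congr_mem _ _ _ (fun x _ => (bPriority_beq_three ql qws x).symm)
  rw [he3]
  cases h3 : topics.any (fun t => bPriority ql qws t == 3) with
  | true =>
      obtain ⟨v, hv⟩ : ∃ v, topics.find? (fun t => bPriority ql qws t == 3) = some v := by
        rw [← Option.isSome_iff_exists, List.find?_isSome]; simpa using h3
      simp [h3, hv]
  | false =>
      have hall3 : ∀ x ∈ topics, (PySem.Str.lower x == ql) = false := by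
        intro x hx
        have hb := List.any_eq_false.mp h3 x hx
        simpa [bPriority_beq_three ql qws x] using hb
      have hfe : topics.find? (fun t => bPriority ql qws t == 3) = none := by
        rw [List.find?_eq_none]
        intro x hx
        exact List.any_eq_false.mp h3 x hx
      rw [hfe]
      have he2 : topics.find? (fun t => PySem.Str.isIn ql (PySem.Str.lower t))
          = topics.find? (fun t => bPriority ql qws t == 2) :=
        find?_congr_mem _ _ _ (fun x hx => (bPriority_beq_two ql qws x (hall3 x hx)).symm)
      rw [he2]
      cases h2 : topics.any (fun t => bPriority ql qws t == 2) with
      | true =>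
          obtain ⟨v, hv⟩ : ∃ v, topics.find? (fun t => bPriority ql qws t == 2) = some v := by
            rw [← Option.isSome_iff_exists, List.find?_isSome]; simpa using h2
          simp [h3, h2, hv]
      | false =>
          have hall2 : ∀ x ∈ topics, PySem.Str.isIn ql (PySem.Str.lower x) = false := by
            intro x hx
            have hb := List.any_eq_false.mp h2 x hx
            simpa [bPriority_beq_two ql qws x (hall3 x hx)] using hb
          have hfs : topics.find? (fun t => bPriority ql qws t == 2) = none := by
            rw [List.find?_eq_none]
            intro x hx
            exact List.any_eq_false.mp h2 x hx
          rw [hfs]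
          have he1 : topics.find? (fun t => qws.any (fun w => (PySem.Str.split₀ (PySem.Str.lower t)).contains w))
              = topics.find? (fun t => bPriority ql qws t == 1) :=
            find?_congr_mem _ _ _
              (fun x hx => (bPriority_beq_one ql qws x (hall3 x hx) (hall2 x hx)).symm)
          rw [he1]
          cases h1 : topics.any (fun t => bPriority ql qws t == 1) with
          | true => simp [h3, h2, h1]
          | false =>
              have hf1 : topics.find? (fun t => bPriority ql qws t == 1) = none := by
                rw [List.find?_eq_none]
                intro x hx
                exact List.any_eq_false.mp h1 x hx
              simp [h3, h2, h1, hf1]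

-- ===== VERDICT (by name: the statement is the Claim_ definition above) =====
theorem find_matching_topic_py_spec : Claim_equal_find_matching_topic_py := by
  intro query topics _
  exact find_matching_topic_py_eq query topics
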